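-- pv_equiv track=rewrite | github.com/VDBWRAIR/ngs_mapper | BamCoverage/bam_to_json.py | parse_mapstats
-- ===== SOURCE A (Python) =====
-- class RegionTypes(object):
--     # It is ok to be lazy sometimes
--     n = 'Normal'
--     g = 'Gap'
--     lc = 'LowCoverage'
--     lq = 'LowQuality'
--
-- class Thresholds(object):
--     # Low Coverage Threshold
--     #  Depth at a given alignment position
--     #  <= this number is
--     # Low Coverage
--     LCDT = 9
--     # Gap
--     GDT = 0
--
--     # Average Quality Threshold
--     #  Average base quality at a given alignment position
--     #   <= this number is
--     # Low Quality
--     LCAQT = 25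
--     # Gap
--     GAQT = 0
--
--     def __str__( self ):
--         import pprint
--         pprint.pprint( self.__dict__ )
--
-- def parse_mapstats( mapstats ):
--     '''
--         Consolidates mapstats from parse_pileup into regions of
--             low coverage, gaps and regular
--
--         Beginning of reference is position 1(aka 1 indexed sequences)
--         Each adjacent region will share a base. That is, the left region's end == right region's start
--
--         @param mapstats - dictionary of reference information from parse_pileup for single reference
--
--         @returns list of regions as tuples (start,stop,regiontype)
--     '''
--     # Beginning region
--     rtype = region_type(mapstats['depths'][0],mapstats['avgquals'][0])
--     regions = [(1,0,rtype)]
--     for pos,dq in enumerate( zip(mapstats['depths'],mapstats['avgquals']), 1 ):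
--         depth, avgqual = dq
--         rtype = region_type( depth, avgqual )
--         # If current region's rtype is different
--         # Start a new region
--         if regions[-1][2] != rtype:
--             # End the last region
--             regions[-1] = (regions[-1][0],int(pos),regions[-1][2])
--             # Start the new region
--             regions.append((pos,0,rtype))
--
--     # Finish up the last region
--     #regions[-1][1] = int(pos)
--     regions[-1] = (regions[-1][0],int(pos),regions[-1][2])
--
--     return regions
--
-- def region_type( depth, avgqual ):
--     '''
--         Determins the region type from the given depth and average quality
--
--         @returns one of the RegionTypes
--     '''
--     #pos, base, depth, seq, quals = mstat
--     #avgqual = sum(quals)/depth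
--     if depth <= Thresholds.GDT or avgqual <= Thresholds.GAQT:
--         return RegionTypes.g
--     elif depth <= Thresholds.LCDT:
--         return RegionTypes.lc
--     elif avgqual <= Thresholds.LCAQT:
--         return RegionTypes.lq
--     else:
--         return RegionTypes.n
-- ===== SOURCE B (Python) =====
-- class RegionTypes(object):
--     n = 'Normal'
--     g = 'Gap'
--     lc = 'LowCoverage'
--     lq = 'LowQuality'
--
-- class Thresholds(object):
--     LCDT = 9
--     GDT = 0
--     LCAQT = 25
--     GAQT = 0
--
-- def region_type(depth, avgqual):
--     if depth <= Thresholds.GDT or avgqual <= Thresholds.GAQT: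
--         return RegionTypes.g
--     elif depth <= Thresholds.LCDT:
--         return RegionTypes.lc
--     elif avgqual <= Thresholds.LCAQT:
--         return RegionTypes.lq
--     else:
--         return RegionTypes.n
--
-- def parse_mapstats(mapstats):
--     # Pass 1: materialize the per-position region types.
--     types = [region_type(d, q) for d, q in zip(mapstats['depths'], mapstats['avgquals'])]
--     # Pass 2: collect the 1-indexed run-start positions (with the run's type):
--     # position 1, plus every position whose type differs from its predecessor's.
--     starts = [(1, types[0])]
--     starts += [(i, cur) for i, (prev, cur) in enumerate(zip(types, types[1:]), 2) if prev != cur]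
--     # Pass 3: each region ends where the next one starts (shared base); the last ends at N.
--     ends = [s for s, _ in starts[1:]] + [len(types)]
--     return [(s, e, t) for (s, t), e in zip(starts, ends)]
-- ===== Notes on version B (the rewrite author's own statement) =====
-- stated objective: alternative
-- what changed: B is a staged decomposition: it materializes the per-position type list, then a comprehension collects the 1-indexed change points (run starts with their types), then regions come from zipping the starts with their shifted copy (each end = next start, last = N), replacing A's single incremental loop that appends open regions and mutates the last list element to close them.
import Mathlib
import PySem

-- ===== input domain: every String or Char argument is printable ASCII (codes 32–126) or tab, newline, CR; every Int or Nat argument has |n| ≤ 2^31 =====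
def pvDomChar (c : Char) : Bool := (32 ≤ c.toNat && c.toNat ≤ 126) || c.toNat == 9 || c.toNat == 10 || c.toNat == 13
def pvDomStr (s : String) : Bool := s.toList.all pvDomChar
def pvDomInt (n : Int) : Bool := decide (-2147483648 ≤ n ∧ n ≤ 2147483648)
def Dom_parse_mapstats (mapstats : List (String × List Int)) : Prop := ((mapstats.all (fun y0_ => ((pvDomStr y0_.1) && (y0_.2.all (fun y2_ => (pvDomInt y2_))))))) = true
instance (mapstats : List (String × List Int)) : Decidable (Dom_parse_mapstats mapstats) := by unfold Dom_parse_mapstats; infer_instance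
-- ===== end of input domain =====

-- B replaces A's append-and-mutate-last-region loop by three staged passes: materialize the
-- per-position types, collect change-point start positions, zip starts with their shifted copy
-- to emit regions (objective: alternative).


-- ===== PORT A =====
-- mapstats[k]: first-match lookup; Pre_ guarantees the key is present (KeyError otherwise)
def pvLookup (m : List (String × List Int)) (k : String) : List Int :=
  (List.lookup k m).getD []

-- region_type (shared helper of both Python files)
def regionType (depth avgqual : Int) : String :=
  if depth ≤ 0 ∨ avgqual ≤ 0 then "Gap"
  else if depth ≤ 9 then "LowCoverage"
  else if avgqual ≤ 25 then "LowQuality"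
  else "Normal"

-- one iteration of A's loop; regions are kept most-recent-first (Python's regions[-1] = head),
-- reversed on return
def pvStepA (st : List (Int × Int × String) × Int) (pdq : Int × Int × Int) :
    List (Int × Int × String) × Int :=
  let pos := pdq.1
  let rt := regionType pdq.2.1 pdq.2.2
  match st.1 with
  | [] => (st.1, pos)   -- unreachable: regions starts nonempty
  | last :: rest =>
    if last.2.2 ≠ rt then ((pos, 0, rt) :: (last.1, pos, last.2.2) :: rest, pos)
    else (st.1, pos)

-- regions[-1] = (regions[-1][0], int(pos), regions[-1][2]); return regions (un-reversed)
def pvFinish (regs : List (Int × Int × String)) (pos : Int) : List (Int × Int × String) :=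
  match regs with
  | [] => []
  | last :: rest => ((last.1, pos, last.2.2) :: rest).reverse

def parse_mapstats (mapstats : List (String × List Int)) : List (Int × Int × String) :=
  let depths := pvLookup mapstats "depths"
  let avgquals := pvLookup mapstats "avgquals"
  -- mapstats['depths'][0] / mapstats['avgquals'][0]: Pre_ excludes the IndexError (empty) inputs
  let rtype := regionType (depths.headD 0) (avgquals.headD 0)
  let st := (PySem.List.enumerate (depths.zip avgquals) 1).foldl pvStepA ([(1, 0, rtype)], 0)
  pvFinish st.1 st.2

-- ===== PORT B =====
-- B's pass 2 comprehension: [(i, cur) for i, (prev, cur) in enumerate(zip(types, types[1:]), 2) if prev != cur]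
def pvChangePts (types : List String) : List (Int × String) :=
  (PySem.List.enumerate (types.zip types.tail) 2).filterMap
    (fun p => if p.2.1 ≠ p.2.2 then some (p.1, p.2.2) else none)

def parse_mapstats_alt (mapstats : List (String × List Int)) : List (Int × Int × String) :=
  let depths := pvLookup mapstats "depths"
  let avgquals := pvLookup mapstats "avgquals"
  let types := (depths.zip avgquals).map (fun dq => regionType dq.1 dq.2)
  -- types[0]: Pre_ excludes the empty (IndexError) inputs, so headD never takes its default
  let starts := (1, types.headD "") :: pvChangePts types
  let ends := (starts.tail.map (·.1)) ++ [(types.length : Int)]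
  (starts.zip ends).map (fun p => (p.1.1, p.2, p.1.2))

-- ===== PRECONDITION & SPEC =====
-- Pre_ excludes exactly the inputs where A raises: a missing 'depths'/'avgquals' key (KeyError)
-- or an empty depths/avgquals list (IndexError on [0]).
def Pre_parse_mapstats (mapstats : List (String × List Int)) : Prop :=
  pvLookup mapstats "depths" ≠ [] ∧ pvLookup mapstats "avgquals" ≠ []
instance (mapstats : List (String × List Int)) : Decidable (Pre_parse_mapstats mapstats) := by
  unfold Pre_parse_mapstats; infer_instance

def pvWitness_parse_mapstats : (List (String × List Int)) :=
  [("depths", [12, 12, 3]), ("avgquals", [30, 30, 30])]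

def Spec_parse_mapstats (mapstats : List (String × List Int)) (out : List (Int × Int × String)) : Prop := out = parse_mapstats_alt mapstats
instance (mapstats : List (String × List Int)) (out : List (Int × Int × String)) : Decidable (Spec_parse_mapstats mapstats out) := by unfold Spec_parse_mapstats; infer_instance

-- ===== CLAIM (what is proved, stated in full; the proofs are below) =====
def Claim_equal_parse_mapstats : Prop := ∀ (mapstats : List (String × List Int)), Dom_parse_mapstats mapstats → Pre_parse_mapstats mapstats → Spec_parse_mapstats mapstats (parse_mapstats mapstats)

-- ===== LEMMAS AND PROOFS =====

-- the common reference function: regions of the type list ts, current run started at `start`,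
-- last consumed position p of type cur; adjacent regions share the boundary base
def pvFspec (start p : Int) (cur : String) : List String → List (Int × Int × String)
  | [] => [(start, p, cur)]
  | x :: xs =>
    if x = cur then pvFspec start (p + 1) cur xs
    else (start, p + 1, cur) :: pvFspec (p + 1) (p + 1) x xs

-- A's in-progress region stack (most recent first, open region's end still 0)
def pvFrev (start p : Int) (cur : String) : List String → List (Int × Int × String)
  | [] => [(start, 0, cur)]
  | x :: xs =>
    if x = cur then pvFrev start (p + 1) cur xs
    else pvFrev (p + 1) (p + 1) x xs ++ [(start, p + 1, cur)]

def pvT (dq : Int × Int) : String := regionType dq.1 dq.2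

theorem pvL1 (rest : List (Int × Int)) : ∀ (start p : Int) (cur : String)
    (closed : List (Int × Int × String)),
    (PySem.List.enumerate rest (p + 1)).foldl pvStepA ((start, 0, cur) :: closed, p)
      = (pvFrev start p cur (rest.map pvT) ++ closed, p + rest.length) := by
  induction rest with
  | nil => intro start p cur closed; simp [PySem.List.enumerate, pvFrev]
  | cons x xs ih =>
    intro start p cur closed
    rw [PySem.List.enumerate_cons]
    simp only [List.foldl_cons, pvStepA]
    by_cases h : cur = regionType x.1 x.2
    · rw [if_neg (by simp [h])]
      rw [ih start (p + 1) cur closed]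
      simp only [List.map_cons, pvFrev, pvT, if_pos h.symm, List.length_cons, Prod.mk.injEq]
      exact ⟨trivial, by push_cast; ring⟩
    · rw [if_pos h]
      rw [ih (p + 1) (p + 1) (regionType x.1 x.2) ((start, p + 1, cur) :: closed)]
      simp only [List.map_cons, pvFrev, pvT, if_neg (Ne.symm h), List.append_assoc,
        List.singleton_append, List.length_cons, Prod.mk.injEq]
      exact ⟨trivial, by push_cast; ring⟩

theorem pvL2 (ts : List String) : ∀ (start p : Int) (cur : String)
    (closed : List (Int × Int × String)),
    pvFinish (pvFrev start p cur ts ++ closed) (p + ts.length)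
      = closed.reverse ++ pvFspec start p cur ts := by
  induction ts with
  | nil => intro start p cur closed; simp [pvFrev, pvFinish, pvFspec]
  | cons x xs ih =>
    intro start p cur closed
    by_cases h : x = cur
    · have e : p + ((x :: xs).length : Int) = (p + 1) + (xs.length : Int) := by push_cast [List.length_cons]; ring
      rw [e]
      simp only [pvFrev, if_pos h, pvFspec, ih]
    · have e : p + ((x :: xs).length : Int) = (p + 1) + (xs.length : Int) := by push_cast [List.length_cons]; ring
      rw [e]
      simp only [pvFrev, if_neg h, pvFspec, List.append_assoc, List.singleton_append]
      rw [ih]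
      simp

theorem parse_mapstats_eq_fspec (m : List (String × List Int))
    (hd : pvLookup m "depths" ≠ []) (hq : pvLookup m "avgquals" ≠ []) :
    parse_mapstats m
      = pvFspec 1 1 (pvT ((pvLookup m "depths").headD 0, (pvLookup m "avgquals").headD 0))
          (((pvLookup m "depths").zip (pvLookup m "avgquals")).tail.map pvT) := by
  obtain ⟨d0, d', hdd⟩ := List.exists_cons_of_ne_nil hd
  obtain ⟨q0, q', hqq⟩ := List.exists_cons_of_ne_nil hq
  unfold parse_mapstats
  rw [hdd, hqq]
  simp only [List.zip_cons_cons, List.headD_cons, List.tail_cons]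
  rw [show (1 : Int) = 0 + 1 by ring, PySem.List.enumerate_cons]
  simp only [List.foldl_cons]
  have hstep : pvStepA ([(0 + 1, 0, regionType d0 q0)], 0) (0 + 1, (d0, q0))
      = ([(0 + 1, 0, regionType d0 q0)], 0 + 1) := by
    simp [pvStepA]
  rw [hstep, pvL1 (d'.zip q') (0 + 1) (0 + 1) (regionType d0 q0) []]
  dsimp only
  simp only [List.append_nil]
  have h2 := pvL2 ((d'.zip q').map pvT) (0 + 1) (0 + 1) (regionType d0 q0) []
  simp only [List.length_map, List.append_nil, List.reverse_nil, List.nil_append] at h2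
  rw [h2]
  simp [pvT]

-- structural form of B's change-point comprehension
def pvG (c : String) (k : Int) : List String → List (Int × String)
  | [] => []
  | x :: xs => (if x ≠ c then [(k, x)] else []) ++ pvG x (k + 1) xs

theorem pvChangePts_cons (ts : List String) : ∀ (c : String) (k : Int),
    (PySem.List.enumerate ((c :: ts).zip ts) k).filterMap
      (fun p => if p.2.1 ≠ p.2.2 then some (p.1, p.2.2) else none)
      = pvG c k ts := by
  induction ts with
  | nil => intro c k; simp [pvG]
  | cons x xs ih =>
    intro c k
    simp only [List.zip_cons_cons, PySem.List.enumerate_cons, List.filterMap_cons]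
    rw [ih x (k + 1)]
    by_cases h : x = c
    · simp [pvG, h]
    · simp [pvG, h, Ne.symm h]

-- B's pass 3 as a structural recursion over the starts list
def pvAsm (n : Int) : List (Int × String) → List (Int × Int × String)
  | [] => []
  | [(s, t)] => [(s, n, t)]
  | (s, t) :: (s', t') :: rest => (s, s', t) :: pvAsm n ((s', t') :: rest)

theorem pvZipEnds (S : List (Int × String)) (n : Int) :
    (S.zip ((S.tail.map (·.1)) ++ [n])).map (fun p => (p.1.1, p.2, p.1.2)) = pvAsm n S := by
  induction S with
  | nil => simp [pvAsm]
  | cons a S ih =>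
    cases S with
    | nil => simp [pvAsm]
    | cons b rest =>
      simp only [List.tail_cons, List.map_cons, List.cons_append, List.zip_cons_cons] at ih ⊢
      rw [ih]
      rfl

theorem pvAsmG (ts : List String) : ∀ (s p : Int) (c : String),
    pvAsm (p + ts.length) ((s, c) :: pvG c (p + 1) ts) = pvFspec s p c ts := by
  induction ts with
  | nil => intro s p c; simp [pvG, pvAsm, pvFspec]
  | cons x xs ih =>
    intro s p c
    have e : p + ((x :: xs).length : Int) = (p + 1) + (xs.length : Int) := by
      push_cast [List.length_cons]; ring
    rw [e]
    by_cases h : x = c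
    · subst h
      simp only [pvG, if_neg (not_not_intro rfl), List.nil_append]
      rw [ih s (p + 1) x]
      simp [pvFspec]
    · simp only [pvG, if_pos (by simpa using h), List.singleton_append]
      have : pvAsm (p + 1 + (xs.length : Int)) ((s, c) :: (p + 1, x) :: pvG x (p + 1 + 1) xs)
          = (s, p + 1, c) :: pvAsm (p + 1 + (xs.length : Int)) ((p + 1, x) :: pvG x ((p + 1) + 1) xs) := rfl
      rw [this, ih (p + 1) (p + 1) x]
      simp [pvFspec, h]

theorem parse_mapstats_alt_eq_fspec (m : List (String × List Int))
    (hd : pvLookup m "depths" ≠ []) (hq : pvLookup m "avgquals" ≠ []) :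
    parse_mapstats_alt m
      = pvFspec 1 1 (pvT ((pvLookup m "depths").headD 0, (pvLookup m "avgquals").headD 0))
          (((pvLookup m "depths").zip (pvLookup m "avgquals")).tail.map pvT) := by
  obtain ⟨d0, d', hdd⟩ := List.exists_cons_of_ne_nil hd
  obtain ⟨q0, q', hqq⟩ := List.exists_cons_of_ne_nil hq
  unfold parse_mapstats_alt pvChangePts
  rw [hdd, hqq]
  simp only [List.zip_cons_cons, List.map_cons, List.headD_cons, List.tail_cons]
  have hfun : (fun dq : Int × Int => regionType dq.1 dq.2) = pvT := rfl
  rw [hfun]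
  rw [pvChangePts_cons ((d'.zip q').map pvT) (regionType d0 q0) 2]
  have hz := pvZipEnds ((1, regionType d0 q0) :: pvG (regionType d0 q0) 2 ((d'.zip q').map pvT))
      (((regionType d0 q0 :: (d'.zip q').map pvT).length : Int))
  simp only [List.tail_cons] at hz
  rw [hz]
  have e : ((regionType d0 q0 :: (d'.zip q').map pvT).length : Int)
      = 1 + (((d'.zip q').map pvT).length : Int) := by push_cast [List.length_cons]; ring
  rw [e, show (2 : Int) = 1 + 1 by ring]
  exact pvAsmG ((d'.zip q').map pvT) 1 1 (regionType d0 q0)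

-- ===== VERDICT (by name: the statement is the Claim_ definition above) =====
theorem parse_mapstats_spec : Claim_equal_parse_mapstats := by
  intro m _hdom hpre
  obtain ⟨hd, hq⟩ := hpre
  unfold Spec_parse_mapstats
  rw [parse_mapstats_eq_fspec m hd hq, parse_mapstats_alt_eq_fspec m hd hq]
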